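-- pv_equiv track=rewrite | github.com/Buck4437/Advent-of-Code-2022 | Day16/main.py | reduce_graph
-- ===== SOURCE A (Python) =====
-- def find_min_dst(start, end, graph):
--     queue = {start}
--     visited = set()
--     dst = 0
--     while len(queue) > 0:
--         if end in queue:
--             return dst
--         new_queue = set()
--         for node in queue:
--             visited.add(node)
--             for neighbour in graph[node]:
--                 if neighbour not in visited:
--                     new_queue.add(neighbour)
--         queue = new_queue
--         dst += 1
--     return -1
--
-- def reduce_graph(graph, relevant_valves):
--     reduced_graph = {}
--     for start in relevant_valves:
--         reduced_graph[start] = {}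
--         for end in relevant_valves:
--             if start != end:
--                 dst = find_min_dst(start, end, graph)
--                 reduced_graph[start][end] = dst
--     return reduced_graph
-- ===== SOURCE B (Python) =====
-- def reduce_graph(graph, relevant_valves):
--     # One BFS per start valve: compute the whole distance map from each relevant
--     # valve in a single sweep, then read every end distance off the map.
--     reduced_graph = {}
--     for start in relevant_valves:
--         dist = {start: 0}
--         frontier = [start]
--         d = 0
--         while frontier:
--             nxt = []
--             for node in frontier:
--                 for nb in graph.get(node, []):
--                     if nb not in dist:
--                         dist[nb] = d + 1
--                         nxt.append(nb)
--             frontier = nxt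
--             d += 1
--         reduced_graph[start] = {end: dist.get(end, -1)
--                                 for end in relevant_valves if end != start}
--     return reduced_graph
-- ===== Notes on version B (the rewrite author's own statement) =====
-- stated objective: alternative
-- what changed: A runs a separate start-to-end BFS for every ordered pair of relevant valves; B runs a single BFS per start valve that computes the whole distance map at once and reads every end distance off it (unreachable -> -1).
import Mathlib
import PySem

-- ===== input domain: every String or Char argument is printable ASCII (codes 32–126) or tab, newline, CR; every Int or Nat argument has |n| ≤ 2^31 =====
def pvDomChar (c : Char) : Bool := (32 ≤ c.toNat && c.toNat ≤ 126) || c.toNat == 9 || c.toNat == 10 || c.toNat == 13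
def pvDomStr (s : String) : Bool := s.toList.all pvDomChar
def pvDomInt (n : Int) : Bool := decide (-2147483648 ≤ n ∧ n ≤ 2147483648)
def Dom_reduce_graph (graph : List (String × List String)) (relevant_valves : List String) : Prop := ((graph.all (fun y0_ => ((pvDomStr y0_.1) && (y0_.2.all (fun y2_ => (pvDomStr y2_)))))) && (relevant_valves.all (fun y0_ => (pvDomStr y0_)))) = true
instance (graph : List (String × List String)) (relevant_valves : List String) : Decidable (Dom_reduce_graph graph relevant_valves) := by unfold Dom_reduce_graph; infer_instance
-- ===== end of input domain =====

-- B replaces A's one-BFS-per-(start,end)-pair by a single BFS per start valve that records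
-- the distance to every node at once and reads each end off the map (objective: alternative).

-- ===== PORT A =====
-- graph[node] (A) / graph.get(node, []) (B): under Pre_ every node looked up is a key, so
-- getD is exact for both; shared by the two ports only as this one-line dictionary lookup.
def pvNbrs (graph : List (String × List String)) (node : String) : List String :=
  (PySem.Dict.mk graph).getD node []

-- one iteration of A's while-loop body:
-- 'for node in queue: visited.add(node); for nb in graph[node]: if nb not in visited: new_queue.add(nb)'
def pvExpandA (graph : List (String × List String)) (queue : List String)
    (visited newq : PySem.Set String) : PySem.Set String × PySem.Set String :=
  queue.foldl
    (fun st node =>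
      let v := PySem.Set.add st.1 node
      (v, (pvNbrs graph node).foldl
            (fun nq nb => if nb ∈ v then nq else PySem.Set.add nq nb) st.2))
    (visited, newq)

-- the 'while len(queue) > 0' loop; the Nat argument is a fuel totality guard only
-- (proved never to matter: when the fuel runs out the queue is already empty, so Python
-- would also return -1).
def pvLoopA (graph : List (String × List String)) (e : String) :
    PySem.Set String → PySem.Set String → Int → Nat → Int
  | _, _, _, 0 => -1
  | queue, visited, dst, fuel + 1 =>
    if queue.length = 0 then -1
    else if e ∈ queue then dst
    else
      let st := pvExpandA graph queue visited PySem.Set.empty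
      pvLoopA graph e st.2 st.1 (dst + 1) fuel

def pvFuel (graph : List (String × List String)) : Nat :=
  (graph.map (fun p => p.2.length)).sum + graph.length + 5

def find_min_dst (start e : String) (graph : List (String × List String)) : Int :=
  pvLoopA graph e (PySem.Set.ofList [start]) PySem.Set.empty 0 (pvFuel graph)

def reduce_graph (graph : List (String × List String)) (relevant_valves : List String) :
    List (String × List (String × Int)) :=
  (relevant_valves.foldl
    (fun rg start =>
      -- 'reduced_graph[start] = {}' then the inner loop fills that dict in place
      let inner := relevant_valves.foldl
        (fun inner e =>
          if start ≠ e then PySem.Dict.insert inner e (find_min_dst start e graph) else inner)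
        (PySem.Dict.mk [])
      PySem.Dict.insert rg start inner)
    (PySem.Dict.mk [])).items.map (fun p => (p.1, p.2.items))

-- ===== PORT B =====
-- one level of B's BFS:
-- 'for node in frontier: for nb in graph.get(node, []): if nb not in dist: dist[nb] = d+1; nxt.append(nb)'
def pvStepB (graph : List (String × List String)) (d : Int) (frontier : List String)
    (dist : PySem.Dict String Int) : PySem.Dict String Int × List String :=
  frontier.foldl
    (fun st node =>
      (pvNbrs graph node).foldl
        (fun st nb =>
          if (PySem.Dict.contains st.1 nb) then st
          else (PySem.Dict.insert st.1 nb (d + 1), st.2 ++ [nb]))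
        st)
    (dist, [])

-- B's 'while frontier:' loop (fuel is a totality guard; proved sufficient below)
def pvLoopB (graph : List (String × List String)) :
    PySem.Dict String Int → List String → Int → Nat → PySem.Dict String Int
  | dist, _, _, 0 => dist
  | dist, frontier, d, fuel + 1 =>
    if frontier.isEmpty then dist
    else
      let st := pvStepB graph d frontier dist
      pvLoopB graph st.1 st.2 (d + 1) fuel

def pvBfs (graph : List (String × List String)) (start : String) : PySem.Dict String Int :=
  pvLoopB graph (PySem.Dict.mk [(start, 0)]) [start] 0 (pvFuel graph)

def reduce_graph_alt (graph : List (String × List String)) (relevant_valves : List String) :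
    List (String × List (String × Int)) :=
  (relevant_valves.foldl
    (fun rg start =>
      let dist := pvBfs graph start
      let inner := relevant_valves.foldl
        (fun inner e =>
          if e ≠ start then PySem.Dict.insert inner e (PySem.Dict.getD dist e (-1)) else inner)
        (PySem.Dict.mk [])
      PySem.Dict.insert rg start inner)
    (PySem.Dict.mk [])).items.map (fun p => (p.1, p.2.items))

-- ===== PRECONDITION & SPEC =====
-- Pre_ excludes (a) association lists with duplicate keys, which no Python dict can be, and
-- (b) when at least two distinct relevant valves exist (so A actually runs a BFS), graphs
-- that are not closed under adjacency or miss a relevant valve, on which Python's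
-- graph[node] raises KeyError; A can still return on a few such non-closed graphs whose
-- missing nodes happen never to be expanded because every BFS meets its target first —
-- whether A raises there depends on BFS reach, not on a closed-form shape of the input.
def Pre_reduce_graph (graph : List (String × List String)) (relevant_valves : List String) : Prop :=
  (graph.map Prod.fst).Nodup ∧
  (1 < (PySem.Set.ofList relevant_valves).length →
    (∀ v ∈ relevant_valves, (PySem.Dict.mk graph).contains v = true) ∧
    (∀ p ∈ graph, ∀ v ∈ p.2, (PySem.Dict.mk graph).contains v = true))
instance (graph : List (String × List String)) (relevant_valves : List String) : Decidable (Pre_reduce_graph graph relevant_valves) := by unfold Pre_reduce_graph; infer_instance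

def pvWitness_reduce_graph : (List (String × List String)) × List String :=
  ([("AA", ["BB", "CC"]), ("BB", ["AA"]), ("CC", ["CC"])], ["AA", "BB"])

def Spec_reduce_graph (graph : List (String × List String)) (relevant_valves : List String) (out : List (String × List (String × Int))) : Prop := out = reduce_graph_alt graph relevant_valves
instance (graph : List (String × List String)) (relevant_valves : List String) (out : List (String × List (String × Int))) : Decidable (Spec_reduce_graph graph relevant_valves out) := by unfold Spec_reduce_graph; infer_instance

-- ===== CLAIM (what is proved, stated in full; the proofs are below) =====
def Claim_equal_reduce_graph : Prop := ∀ (graph : List (String × List String)) (relevant_valves : List String), Dom_reduce_graph graph relevant_valves → Pre_reduce_graph graph relevant_valves → Spec_reduce_graph graph relevant_valves (reduce_graph graph relevant_valves)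

-- ===== LEMMAS AND PROOFS =====

theorem pvWitness_ok :
    Dom_reduce_graph pvWitness_reduce_graph.1 pvWitness_reduce_graph.2 ∧
    Pre_reduce_graph pvWitness_reduce_graph.1 pvWitness_reduce_graph.2 := by decide

-- the set of nodes at distance ≤ k from s (as a Finset)
def pvBall (g : List (String × List String)) (s : String) : Nat → Finset String
  | 0 => {s}
  | k + 1 => pvBall g s k ∪ (pvBall g s k).biUnion (fun u => (pvNbrs g u).toFinset)

-- the ball one level earlier (∅ for k = 0): A's 'visited' after k levels
def pvPrev (g : List (String × List String)) (s : String) : Nat → Finset String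
  | 0 => ∅
  | k + 1 => pvBall g s k

theorem mem_pvBall_succ (g : List (String × List String)) (s x : String) (k : Nat) :
    x ∈ pvBall g s (k + 1) ↔ x ∈ pvBall g s k ∨ ∃ u ∈ pvBall g s k, x ∈ pvNbrs g u := by
  simp [pvBall]

theorem pvBall_mono (g : List (String × List String)) (s : String) {j k : Nat} (h : j ≤ k) :
    pvBall g s j ⊆ pvBall g s k := by
  induction k with
  | zero => simpa [Nat.le_zero.mp h]
  | succ k ih =>
    rcases Nat.le_succ_iff.mp h with h' | h'
    · exact (ih h').trans (by simp [pvBall])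
    · simp [h']

theorem pvBall_stable (g : List (String × List String)) (s : String) {k0 : Nat}
    (h : pvBall g s (k0 + 1) = pvBall g s k0) {j : Nat} (hj : k0 ≤ j) :
    pvBall g s j = pvBall g s k0 := by
  induction j with
  | zero => simp [Nat.le_zero.mp hj]
  | succ j ih =>
    rcases Nat.le_succ_iff.mp hj with h' | h'
    · have hje := ih h'
      show pvBall g s j ∪ _ = _
      rw [hje]; exact h
    · rw [h']

theorem pvNbrs_subset (g : List (String × List String)) (u x : String)
    (hx : x ∈ pvNbrs g u) : x ∈ g.flatMap (fun p => p.2) := by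
  unfold pvNbrs at hx
  rw [PySem.Dict.getD_eq_get?_getD] at hx
  induction g with
  | nil => simp [PySem.Dict.get?] at hx
  | cons p g ih =>
    rw [show PySem.Dict.mk (p :: g) = PySem.Dict.mk ((p.1, p.2) :: g) by rfl,
      PySem.Dict.get?_mk_cons] at hx
    by_cases hp : p.1 == u
    · simp [hp] at hx; simp [List.mem_flatMap]; exact Or.inl hx
    · simp [hp] at hx; simp [List.mem_flatMap] at ih ⊢
      rcases ih hx with ⟨a, b, hab, hxb⟩
      exact Or.inr ⟨a, b, hab, hxb⟩

theorem pvBall_subset_univ (g : List (String × List String)) (s : String) (k : Nat) :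
    pvBall g s k ⊆ insert s (g.flatMap (fun p => p.2)).toFinset := by
  induction k with
  | zero => simp [pvBall]
  | succ k ih =>
    intro x hx
    rw [show pvBall g s (k+1) = pvBall g s k ∪ (pvBall g s k).biUnion (fun u => (pvNbrs g u).toFinset) from rfl] at hx
    rcases Finset.mem_union.mp hx with h | h
    · exact ih h
    · rcases Finset.mem_biUnion.mp h with ⟨u, _, hxu⟩
      simp only [Finset.mem_insert, List.mem_toFinset]
      exact Or.inr (pvNbrs_subset g u x (List.mem_toFinset.mp hxu))

theorem pvBall_exists_stable (g : List (String × List String)) (s : String) :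
    ∃ k0, k0 + 4 ≤ pvFuel g ∧ pvBall g s (k0 + 1) = pvBall g s k0 := by
  have hcard : ∀ k, (insert s (g.flatMap (fun p => p.2)).toFinset).card ≤ k →
      ∃ k0 ≤ k, pvBall g s (k0 + 1) = pvBall g s k0 := by
    intro K
    have key : ∀ k : Nat, (∃ k0 ≤ k, pvBall g s (k0 + 1) = pvBall g s k0) ∨
        k + 1 ≤ (pvBall g s k).card := by
      intro k
      induction k with
      | zero => right; simp [pvBall]
      | succ k ih =>
        rcases ih with ⟨k0, hk0, hst⟩ | hc
        · exact Or.inl ⟨k0, Nat.le_succ_of_le hk0, hst⟩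
        · by_cases h : pvBall g s (k + 1) = pvBall g s k
          · exact Or.inl ⟨k, Nat.le_succ k, h⟩
          · right
            have hss : pvBall g s k ⊂ pvBall g s (k + 1) :=
              (Finset.ssubset_iff_subset_ne.mpr ⟨pvBall_mono g s (Nat.le_succ k), fun he => h he.symm⟩)
            have := Finset.card_lt_card hss
            omega
    intro hK
    rcases key K with ⟨k0, hk0, hst⟩ | hc
    · exact ⟨k0, hk0, hst⟩
    · exfalso
      have := Finset.card_le_card (pvBall_subset_univ g s K)
      omega
  set U := insert s (g.flatMap (fun p => p.2)).toFinset with hU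
  rcases hcard U.card le_rfl with ⟨k0, hk0, hst⟩
  refine ⟨k0, ?_, hst⟩
  have h1 : U.card ≤ (g.flatMap (fun p => p.2)).toFinset.card + 1 := Finset.card_insert_le _ _
  have h2 : (g.flatMap (fun p => p.2)).toFinset.card ≤ (g.flatMap (fun p => p.2)).length :=
    List.toFinset_card_le _
  have h3 : (g.flatMap (fun p => p.2)).length = (g.map (fun p => p.2.length)).sum := by
    simp [List.length_flatMap, Function.comp]
  unfold pvFuel
  omega

theorem pvInnerA_mem (v : PySem.Set String)
    (L : List String) :  ∀ (W : PySem.Set String) (x : String),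
    (x ∈ L.foldl (fun nq nb => if nb ∈ v then nq else PySem.Set.add nq nb) W ↔
      x ∈ W ∨ (x ∈ L ∧ x ∉ v)) := by
  induction L with
  | nil => simp
  | cons nb L ih =>
    intro W x
    simp only [List.foldl_cons]
    by_cases hnb : nb ∈ v
    · simp only [if_pos hnb]
      rw [ih]
      constructor
      · rintro (h | ⟨h1, h2⟩)
        · exact Or.inl h
        · exact Or.inr ⟨List.mem_cons_of_mem _ h1, h2⟩
      · rintro (h | ⟨h1, h2⟩)
        · exact Or.inl h
        · rcases List.mem_cons.mp h1 with rfl | h1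
          · exact absurd hnb h2
          · exact Or.inr ⟨h1, h2⟩
    · simp only [if_neg hnb]
      rw [ih]
      rw [PySem.Set.mem_add]
      constructor
      · rintro ((h | rfl) | ⟨h1, h2⟩)
        · exact Or.inl h
        · exact Or.inr ⟨List.mem_cons_self, hnb⟩
        · exact Or.inr ⟨List.mem_cons_of_mem _ h1, h2⟩
      · rintro (h | ⟨h1, h2⟩)
        · exact Or.inl (Or.inl h)
        · rcases List.mem_cons.mp h1 with rfl | h1
          · exact Or.inl (Or.inr rfl)
          · exact Or.inr ⟨h1, h2⟩

theorem pvExpandA_fst (g : List (String × List String)) (Q : List String) :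
    ∀ (V W : PySem.Set String) (x : String),
    (x ∈ (pvExpandA g Q V W).1 ↔ x ∈ V ∨ x ∈ Q) := by
  induction Q with
  | nil => simp [pvExpandA]
  | cons q Q ih =>
    intro V W x
    show x ∈ (pvExpandA g Q _ _).1 ↔ _
    rw [ih, PySem.Set.mem_add]
    simp [or_assoc]

theorem pvExpandA_snd_sub (g : List (String × List String)) (Q : List String) :
    ∀ (V W : PySem.Set String) (x : String), x ∈ (pvExpandA g Q V W).2 →
    (x ∈ W ∨ ∃ u ∈ Q, x ∈ pvNbrs g u ∧ x ∉ V) := by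
  induction Q with
  | nil => intro V W x h; exact Or.inl h
  | cons q Q ih =>
    intro V W x h
    replace h := ih _ _ x h
    rw [pvInnerA_mem] at h
    rcases h with (h | ⟨h1, h2⟩) | ⟨u, hu, h1, h2⟩
    · exact Or.inl h
    · rw [PySem.Set.mem_add] at h2
      push_neg at h2
      exact Or.inr ⟨q, List.mem_cons_self, h1, h2.1⟩
    · rw [PySem.Set.mem_add] at h2
      push_neg at h2
      exact Or.inr ⟨u, List.mem_cons_of_mem _ hu, h1, h2.1⟩

theorem pvExpandA_snd_sup (g : List (String × List String)) (Q : List String) :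
    ∀ (V W : PySem.Set String) (x : String),
    (x ∈ W ∨ ∃ u ∈ Q, x ∈ pvNbrs g u ∧ x ∉ V ∧ x ∉ Q) → x ∈ (pvExpandA g Q V W).2 := by
  induction Q with
  | nil => rintro V W x (h | ⟨u, hu, _⟩); exact h; simp at hu
  | cons q Q ih =>
    rintro V W x (h | ⟨u, hu, h1, h2, h3⟩)
    · apply ih
      left
      rw [pvInnerA_mem]
      exact Or.inl h
    · have hxq : x ≠ q := fun he => h3 (he ▸ List.mem_cons_self)
      have hxQ : x ∉ Q := fun hq => h3 (List.mem_cons_of_mem _ hq)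
      have hxv : x ∉ PySem.Set.add V q := by
        rw [PySem.Set.mem_add]; push_neg; exact ⟨h2, hxq⟩
      rcases List.mem_cons.mp hu with rfl | hu
      · apply ih
        left
        rw [pvInnerA_mem]
        exact Or.inr ⟨h1, hxv⟩
      · apply ih
        right
        exact ⟨u, hu, h1, hxv, hxQ⟩

def pvInvA (g : List (String × List String)) (s : String) (k : Nat)
    (V Q : PySem.Set String) : Prop :=
  (∀ x, x ∈ V ↔ x ∈ pvPrev g s k) ∧
  (∀ x, x ∈ Q → x ∈ pvBall g s k) ∧
  (∀ x, x ∈ pvBall g s k → x ∈ pvPrev g s k ∨ x ∈ Q)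

theorem pvPrev_subset (g : List (String × List String)) (s : String) (k : Nat) :
    pvPrev g s k ⊆ pvBall g s k := by
  cases k with
  | zero => simp [pvPrev]
  | succ j => exact pvBall_mono g s (Nat.le_succ j)

theorem pvInvA_init (g : List (String × List String)) (s : String) :
    pvInvA g s 0 PySem.Set.empty (PySem.Set.ofList [s]) := by
  refine ⟨?_, ?_, ?_⟩ <;> intro x <;>
    simp [pvPrev, pvBall, PySem.Set.mem_ofList, PySem.Set.empty]

theorem pvInvA_step (g : List (String × List String)) (s : String) (k : Nat)
    (V Q : PySem.Set String) (h : pvInvA g s k V Q) :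
    pvInvA g s (k + 1) (pvExpandA g Q V PySem.Set.empty).1 (pvExpandA g Q V PySem.Set.empty).2 := by
  obtain ⟨i1, i2, i3⟩ := h
  refine ⟨?_, ?_, ?_⟩
  · intro x
    rw [pvExpandA_fst]
    show _ ↔ x ∈ pvBall g s k
    constructor
    · rintro (hx | hx)
      · exact pvPrev_subset g s k ((i1 x).mp hx)
      · exact i2 x hx
    · intro hx
      rcases i3 x hx with hx | hx
      · exact Or.inl ((i1 x).mpr hx)
      · exact Or.inr hx
  · intro x hx
    rcases pvExpandA_snd_sub g Q V PySem.Set.empty x hx with hx | ⟨u, hu, h1, _⟩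
    · simp [PySem.Set.empty] at hx
    · exact (mem_pvBall_succ g s x k).mpr (Or.inr ⟨u, i2 u hu, h1⟩)
  · intro x hx
    by_cases hk : x ∈ pvBall g s k
    · exact Or.inl hk
    · right
      rcases (mem_pvBall_succ g s x k).mp hx with hx' | ⟨u, hu, hxu⟩
      · exact absurd hx' hk
      · have huQ : u ∈ Q := by
          rcases i3 u hu with hp | hq
          · exfalso
            apply hk
            cases k with
            | zero => simp [pvPrev] at hp
            | succ j =>
              exact (mem_pvBall_succ g s x j).mpr (Or.inr ⟨u, hp, hxu⟩)
          · exact hq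
        apply pvExpandA_snd_sup
        right
        refine ⟨u, huQ, hxu, ?_, ?_⟩
        · intro hv
          exact hk (pvPrev_subset g s k ((i1 x).mp hv))
        · intro hq
          exact hk (i2 x hq)

theorem pvQueue_ne_nil (g : List (String × List String)) (s : String) (k : Nat)
    (V Q : PySem.Set String) (h : pvInvA g s k V Q)
    (hns : ∀ j, k = j + 1 → pvBall g s (j + 1) ≠ pvBall g s j) : Q ≠ [] := by
  obtain ⟨i1, i2, i3⟩ := h
  intro hQ
  subst hQ
  cases k with
  | zero =>
    rcases i3 s (by simp [pvBall]) with hp | hq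
    · simp [pvPrev] at hp
    · simp at hq
  | succ j =>
    apply hns j rfl
    apply Finset.Subset.antisymm
    · intro x hx
      rcases i3 x hx with hp | hq
      · exact hp
      · simp at hq
    · exact pvBall_mono g s (Nat.le_succ j)

theorem pvLoopA_unreach (g : List (String × List String)) (s e : String) :
    ∀ (fuel : Nat) (k : Nat) (V Q : PySem.Set String) (dst : Int),
      pvInvA g s k V Q → (∀ j, e ∉ pvBall g s j) →
      pvLoopA g e Q V dst fuel = -1 := by
  intro fuel
  induction fuel with
  | zero => intro k V Q dst _ _; rfl
  | succ f ih =>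
    intro k V Q dst h hun
    show pvLoopA g e Q V dst (f + 1) = -1
    rw [pvLoopA]
    by_cases hQ : Q.length = 0
    · simp [hQ]
    · have heQ : e ∉ Q := fun hq => hun k (h.2.1 e hq)
      simp only [if_neg hQ, if_neg heQ]
      exact ih (k + 1) _ _ _ (pvInvA_step g s k V Q h) hun

theorem pvLoopA_reach (g : List (String × List String)) (s e : String) (m : Nat)
    (hm : e ∈ pvBall g s m) (hmin : ∀ i < m, e ∉ pvBall g s i) :
    ∀ (fuel : Nat) (k : Nat) (V Q : PySem.Set String),
      pvInvA g s k V Q → k ≤ m → m - k < fuel →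
      pvLoopA g e Q V (k : Int) fuel = (m : Int) := by
  intro fuel
  induction fuel with
  | zero => intro k V Q _ _ hf; omega
  | succ f ih =>
    intro k V Q h hkm hf
    show pvLoopA g e Q V (k : Int) (f + 1) = (m : Int)
    rw [pvLoopA]
    by_cases hke : k = m
    · subst hke
      have heQ : e ∈ Q := by
        rcases h.2.2 e hm with hp | hq
        · exfalso
          cases k with
          | zero => simp [pvPrev] at hp
          | succ j => exact hmin j (Nat.lt_succ_self j) hp
        · exact hq
      have hQ : ¬ Q.length = 0 := by
        intro h0
        rw [List.length_eq_zero_iff] at h0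
        subst h0
        simp at heQ
      simp [hQ, heQ]
    · have hklt : k < m := lt_of_le_of_ne hkm hke
      have heQ : e ∉ Q := fun hq => hmin k hklt (h.2.1 e hq)
      have hQne : Q ≠ [] := by
        apply pvQueue_ne_nil g s k V Q h
        intro j hkj hstab
        have : pvBall g s m = pvBall g s j := pvBall_stable g s hstab (by omega)
        exact hmin j (by omega) (this ▸ hm)
      have hQ : ¬ Q.length = 0 := by
        intro h0
        exact hQne (List.length_eq_zero_iff.mp h0)
      simp only [if_neg hQ, if_neg heQ]
      have := ih (k + 1) _ _ (pvInvA_step g s k V Q h) (by omega) (by omega)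
      rw [show ((k : Int) + 1) = ((k + 1 : Nat) : Int) by push_cast; ring]
      exact this

theorem pvInnerB (d : Int) (L : List String) :
    ∀ (dist : PySem.Dict String Int) (nxt : List String),
      (∀ x, PySem.Dict.get? (L.foldl (fun st nb =>
            if (PySem.Dict.contains st.1 nb) then st
            else (PySem.Dict.insert st.1 nb (d + 1), st.2 ++ [nb])) (dist, nxt)).1 x =
          if (PySem.Dict.get? dist x).isSome then PySem.Dict.get? dist x
          else if x ∈ L then some (d + 1) else none) ∧
      (∀ x, x ∈ (L.foldl (fun st nb =>
            if (PySem.Dict.contains st.1 nb) then st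
            else (PySem.Dict.insert st.1 nb (d + 1), st.2 ++ [nb])) (dist, nxt)).2 ↔
          x ∈ nxt ∨ (PySem.Dict.get? dist x = none ∧ x ∈ L)) := by
  induction L with
  | nil =>
    intro dist nxt
    constructor
    · intro x
      by_cases h : (PySem.Dict.get? dist x).isSome
      · simp [h]
      · simp [h]
        simp [Option.isSome_iff_ne_none] at h
        exact h
    · intro x; simp
  | cons nb L ih =>
    intro dist nxt
    simp only [List.foldl_cons]
    by_cases hc : PySem.Dict.contains dist nb
    · have hnb : (PySem.Dict.get? dist nb).isSome := by
        rw [← PySem.Dict.contains_eq_isSome_get?]; exact hc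
      simp only [if_pos hc]
      obtain ⟨ih1, ih2⟩ := ih dist nxt
      constructor
      · intro x
        rw [ih1 x]
        by_cases hx : x = nb
        · subst hx
          simp [hnb]
        · simp [List.mem_cons, hx]
      · intro x
        rw [ih2 x]
        by_cases hx : x = nb
        · subst hx
          constructor
          · rintro (h | ⟨h1, h2⟩)
            · exact Or.inl h
            · rw [h1] at hnb; simp at hnb
          · rintro (h | ⟨h1, h2⟩)
            · exact Or.inl h
            · rw [h1] at hnb; simp at hnb
        · simp [List.mem_cons, hx]
    · have hnb : PySem.Dict.get? dist nb = none := by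
        rw [PySem.Dict.get?_eq_none_iff_contains]
        simp [hc]
      simp only [if_neg hc]
      obtain ⟨ih1, ih2⟩ := ih (PySem.Dict.insert dist nb (d + 1)) (nxt ++ [nb])
      constructor
      · intro x
        rw [ih1 x, PySem.Dict.get?_insert]
        by_cases hx : x = nb
        · subst hx
          simp [hnb]
        · simp only [if_neg hx]
          simp [List.mem_cons, hx]
      · intro x
        rw [ih2 x, PySem.Dict.get?_insert]
        by_cases hx : x = nb
        · subst hx
          simp [hnb]
        · simp [List.mem_cons, hx]

theorem pvStepB_char (g : List (String × List String)) (d : Int) (F : List String) :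
    ∀ (dist : PySem.Dict String Int) (nxt : List String),
      (∀ x, PySem.Dict.get? (F.foldl (fun st node =>
            (pvNbrs g node).foldl (fun st nb =>
              if (PySem.Dict.contains st.1 nb) then st
              else (PySem.Dict.insert st.1 nb (d + 1), st.2 ++ [nb])) st) (dist, nxt)).1 x =
          if (PySem.Dict.get? dist x).isSome then PySem.Dict.get? dist x
          else if ∃ u ∈ F, x ∈ pvNbrs g u then some (d + 1) else none) ∧
      (∀ x, x ∈ (F.foldl (fun st node =>
            (pvNbrs g node).foldl (fun st nb =>
              if (PySem.Dict.contains st.1 nb) then st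
              else (PySem.Dict.insert st.1 nb (d + 1), st.2 ++ [nb])) st) (dist, nxt)).2 ↔
          x ∈ nxt ∨ (PySem.Dict.get? dist x = none ∧ ∃ u ∈ F, x ∈ pvNbrs g u)) := by
  induction F with
  | nil =>
    intro dist nxt
    constructor
    · intro x
      by_cases h : (PySem.Dict.get? dist x).isSome
      · simp [h]
      · simp only [Option.isSome_iff_ne_none, ne_eq, not_not] at h
        simp [h]
    · intro x; simp
  | cons u F ih =>
    intro dist nxt
    simp only [List.foldl_cons]
    obtain ⟨j1, j2⟩ := pvInnerB d (pvNbrs g u) dist nxt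
    obtain ⟨k1, k2⟩ := ih (List.foldl (fun st nb =>
        if (PySem.Dict.contains st.1 nb) then st
        else (PySem.Dict.insert st.1 nb (d + 1), st.2 ++ [nb])) (dist, nxt) (pvNbrs g u)).1
      (List.foldl (fun st nb =>
        if (PySem.Dict.contains st.1 nb) then st
        else (PySem.Dict.insert st.1 nb (d + 1), st.2 ++ [nb])) (dist, nxt) (pvNbrs g u)).2
    constructor
    · intro x
      refine (k1 x).trans ?_
      rw [j1 x]
      by_cases hA : (PySem.Dict.get? dist x).isSome
      · simp [hA]
      · simp only [if_neg hA]
        by_cases hu : x ∈ pvNbrs g u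
        · have hex : ∃ v ∈ u :: F, x ∈ pvNbrs g v := ⟨u, List.mem_cons_self, hu⟩
          simp [hu, hex]
        · simp [hu, List.exists_mem_cons_iff]
    · intro x
      refine Iff.trans (k2 x) ?_
      rw [j2 x, j1 x]
      by_cases hA : (PySem.Dict.get? dist x).isSome
      · have hA' : ¬ PySem.Dict.get? dist x = none := by
          simp [Option.isSome_iff_ne_none] at hA; exact hA
        simp [hA, hA']
      · have hA' : PySem.Dict.get? dist x = none := by
          simp only [Option.isSome_iff_ne_none, ne_eq, not_not] at hA; exact hA
        by_cases hu : x ∈ pvNbrs g u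
        · simp [hA', hu, List.exists_mem_cons_iff]
        · simp [hA', hu, List.exists_mem_cons_iff]

def pvInvB (g : List (String × List String)) (s : String) (k : Nat)
    (dist : PySem.Dict String Int) (frontier : List String) : Prop :=
  (∀ x, x ∈ frontier ↔ (x ∈ pvBall g s k ∧ x ∉ pvPrev g s k)) ∧
  (∀ x, x ∈ pvBall g s k →
    ∃ j, j ≤ k ∧ (∀ i < j, x ∉ pvBall g s i) ∧ x ∈ pvBall g s j ∧
      PySem.Dict.get? dist x = some (j : Int)) ∧
  (∀ x, x ∉ pvBall g s k → PySem.Dict.get? dist x = none)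

theorem pvInvB_init (g : List (String × List String)) (s : String) :
    pvInvB g s 0 (PySem.Dict.mk [(s, 0)]) [s] := by
  refine ⟨?_, ?_, ?_⟩
  · intro x; simp [pvBall, pvPrev]
  · intro x hx
    have hxs : x = s := by simpa [pvBall] using hx
    subst hxs
    refine ⟨0, le_rfl, by omega, by simp [pvBall], ?_⟩
    rw [PySem.Dict.get?_mk_cons]
    simp
  · intro x hx
    have hxs : x ≠ s := by simpa [pvBall] using hx
    rw [PySem.Dict.get?_mk_cons]
    have : (s == x) = false := by simp [Ne.symm hxs]
    rw [this]
    simp only [Bool.false_eq_true, if_false]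
    exact PySem.Dict.get?_empty x

theorem pvInvB_step (g : List (String × List String)) (s : String) (k : Nat)
    (dist : PySem.Dict String Int) (frontier : List String)
    (h : pvInvB g s k dist frontier) :
    pvInvB g s (k + 1) (pvStepB g (k : Int) frontier dist).1 (pvStepB g (k : Int) frontier dist).2 := by
  obtain ⟨f1, f2, f3⟩ := h
  obtain ⟨S1', S2'⟩ := pvStepB_char g (k : Int) frontier dist []
  have S1 : ∀ x, PySem.Dict.get? (pvStepB g (k : Int) frontier dist).1 x =
      if (PySem.Dict.get? dist x).isSome then PySem.Dict.get? dist x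
      else if ∃ u ∈ frontier, x ∈ pvNbrs g u then some ((k : Int) + 1) else none := S1'
  have S2 : ∀ x, x ∈ (pvStepB g (k : Int) frontier dist).2 ↔
      x ∈ ([] : List String) ∨ (PySem.Dict.get? dist x = none ∧ ∃ u ∈ frontier, x ∈ pvNbrs g u) := S2'
  have hfr : ∀ x, x ∉ pvBall g s k → ((∃ u ∈ frontier, x ∈ pvNbrs g u) ↔ x ∈ pvBall g s (k + 1)) := by
    intro x hxk
    constructor
    · rintro ⟨u, hu, hxu⟩
      exact (mem_pvBall_succ g s x k).mpr (Or.inr ⟨u, ((f1 u).mp hu).1, hxu⟩)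
    · intro hx
      rcases (mem_pvBall_succ g s x k).mp hx with hx' | ⟨u, hu, hxu⟩
      · exact absurd hx' hxk
      · refine ⟨u, (f1 u).mpr ⟨hu, ?_⟩, hxu⟩
        intro hp
        apply hxk
        cases k with
        | zero => simp [pvPrev] at hp
        | succ j => exact (mem_pvBall_succ g s x j).mpr (Or.inr ⟨u, hp, hxu⟩)
  refine ⟨?_, ?_, ?_⟩
  · intro x
    rw [S2 x]
    constructor
    · rintro (h | ⟨hnone, hex⟩)
      · simp at h
      · have hxk : x ∉ pvBall g s k := by
          intro hx
          rcases f2 x hx with ⟨j, _, _, _, hj⟩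
          rw [hj] at hnone; simp at hnone
        exact ⟨(hfr x hxk).mp hex, hxk⟩
    · rintro ⟨hx, hxk⟩
      have hxk' : x ∉ pvBall g s k := hxk
      exact Or.inr ⟨f3 x hxk', (hfr x hxk').mpr hx⟩
  · intro x hx
    by_cases hxk : x ∈ pvBall g s k
    · obtain ⟨j, hjk, hjm, hjb, hjs⟩ := f2 x hxk
      refine ⟨j, Nat.le_succ_of_le hjk, hjm, hjb, ?_⟩
      rw [S1 x, hjs]
      simp
    · have hnone := f3 x hxk
      have hex : ∃ u ∈ frontier, x ∈ pvNbrs g u := (hfr x hxk).mpr hx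
      refine ⟨k + 1, le_rfl, ?_, hx, ?_⟩
      · intro i hi hxi
        exact hxk (pvBall_mono g s (by omega) hxi)
      · rw [S1 x, hnone]
        simp only [Option.isSome_none, Bool.false_eq_true, if_false, if_pos hex]
        norm_num
  · intro x hx
    have hxk : x ∉ pvBall g s k := fun h => hx (pvBall_mono g s (Nat.le_succ k) h)
    have hnone := f3 x hxk
    have hnex : ¬ ∃ u ∈ frontier, x ∈ pvNbrs g u := fun hex => hx ((hfr x hxk).mp hex)
    rw [S1 x, hnone]
    simp [hnex]

theorem pvLoopB_run (g : List (String × List String)) (s : String) (k0 : Nat)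
    (hst : pvBall g s (k0 + 1) = pvBall g s k0) :
    ∀ (fuel : Nat) (k : Nat) (dist : PySem.Dict String Int) (frontier : List String),
      pvInvB g s k dist frontier → k0 < k + fuel →
      (∀ x, x ∈ pvBall g s k0 →
        ∃ j, (∀ i < j, x ∉ pvBall g s i) ∧ x ∈ pvBall g s j ∧
          PySem.Dict.get? (pvLoopB g dist frontier (k : Int) fuel) x = some (j : Int)) ∧
      (∀ x, x ∉ pvBall g s k0 →
        PySem.Dict.get? (pvLoopB g dist frontier (k : Int) fuel) x = none) := by
  intro fuel
  induction fuel with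
  | zero =>
    intro k dist frontier h hk
    obtain ⟨f1, f2, f3⟩ := h
    have hke : pvBall g s k = pvBall g s k0 := pvBall_stable g s hst (by omega)
    constructor
    · intro x hx
      rw [← hke] at hx
      obtain ⟨j, _, hjm, hjb, hjs⟩ := f2 x hx
      exact ⟨j, hjm, hjb, hjs⟩
    · intro x hx
      rw [← hke] at hx
      exact f3 x hx
  | succ f ih =>
    intro k dist frontier h hk
    obtain ⟨f1, f2, f3⟩ := h
    show _ ∧ _
    rw [show pvLoopB g dist frontier (k : Int) (f + 1) =
        (if frontier.isEmpty then dist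
         else pvLoopB g (pvStepB g (k : Int) frontier dist).1
           (pvStepB g (k : Int) frontier dist).2 ((k : Int) + 1) f) from rfl]
    by_cases hfe : frontier.isEmpty
    · simp only [if_pos hfe]
      have hnil : frontier = [] := List.isEmpty_iff.mp hfe
      subst hnil
      have hsub : pvBall g s k ⊆ pvPrev g s k := by
        intro x hx
        by_contra hp
        exact (List.not_mem_nil (a := x)) ((f1 x).mpr ⟨hx, hp⟩)
      have hke : pvBall g s k = pvBall g s k0 := by
        cases k with
        | zero =>
          exfalso
          have : s ∈ pvBall g s 0 := by simp [pvBall]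
          simpa [pvPrev] using hsub this
        | succ j =>
          have hstj : pvBall g s (j + 1) = pvBall g s j :=
            Finset.Subset.antisymm hsub (pvBall_mono g s (Nat.le_succ j))
          rcases le_total j k0 with hj | hj
          · rw [hstj]
            exact (pvBall_stable g s hstj hj).symm
          · rw [pvBall_stable g s hst (by omega : k0 ≤ j + 1)]
      constructor
      · intro x hx
        rw [← hke] at hx
        obtain ⟨j, _, hjm, hjb, hjs⟩ := f2 x hx
        exact ⟨j, hjm, hjb, hjs⟩
      · intro x hx
        rw [← hke] at hx
        exact f3 x hx
    · simp only [if_neg hfe]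
      have := ih (k + 1) (pvStepB g (k : Int) frontier dist).1 (pvStepB g (k : Int) frontier dist).2
        (pvInvB_step g s k dist frontier ⟨f1, f2, f3⟩) (by omega)
      rw [show ((k : Int) + 1) = ((k + 1 : Nat) : Int) by push_cast; ring]
      exact this

theorem pvPair_eq (g : List (String × List String)) (s e : String) :
    find_min_dst s e g = PySem.Dict.getD (pvBfs g s) e (-1) := by
  obtain ⟨k0, hk0f, hst⟩ := pvBall_exists_stable g s
  have hrun := pvLoopB_run g s k0 hst (pvFuel g) 0 (PySem.Dict.mk [(s, 0)]) [s]
    (pvInvB_init g s) (by omega)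
  rw [Nat.cast_zero] at hrun
  have hA0 : pvInvA g s 0 PySem.Set.empty (PySem.Set.ofList [s]) := pvInvA_init g s
  unfold find_min_dst pvBfs
  by_cases hreach : ∃ j, e ∈ pvBall g s j
  · set m := Nat.find hreach with hmdef
    have hm : e ∈ pvBall g s m := Nat.find_spec hreach
    have hmin : ∀ i < m, e ∉ pvBall g s i := fun i hi => Nat.find_min hreach hi
    have hmk0 : m ≤ k0 := by
      by_contra hc
      push_neg at hc
      have hball : pvBall g s m = pvBall g s k0 := pvBall_stable g s hst (le_of_lt hc)
      have : m ≤ k0 := Nat.find_min' hreach (hball ▸ hm)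
      omega
    have hA := pvLoopA_reach g s e m hm hmin (pvFuel g) 0 PySem.Set.empty
      (PySem.Set.ofList [s]) hA0 (Nat.zero_le m) (by omega)
    rw [Nat.cast_zero] at hA
    rw [hA]
    obtain ⟨j, hjm, hjb, hjs⟩ := hrun.1 e (pvBall_mono g s hmk0 hm)
    have hjeq : j = m := by
      have h1 : m ≤ j := Nat.find_min' hreach hjb
      have h2 : ¬ m < j := fun hlt => hjm m hlt hm
      omega
    rw [PySem.Dict.getD_eq_get?_getD, hjs, hjeq]
    rfl
  · push_neg at hreach
    have hA := pvLoopA_unreach g s e (pvFuel g) 0 PySem.Set.empty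
      (PySem.Set.ofList [s]) 0 hA0 hreach
    rw [hA]
    rw [PySem.Dict.getD_eq_get?_getD, hrun.2 e (hreach k0)]
    rfl

theorem pvMain (g : List (String × List String)) (r : List String) :
    reduce_graph g r = reduce_graph_alt g r := by
  unfold reduce_graph reduce_graph_alt
  have hfold :
      r.foldl (fun rg start =>
        PySem.Dict.insert rg start (r.foldl
          (fun inner e =>
            if start ≠ e then PySem.Dict.insert inner e (find_min_dst start e g) else inner)
          (PySem.Dict.mk []))) (PySem.Dict.mk []) =
      r.foldl (fun rg start =>
        PySem.Dict.insert rg start (r.foldl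
          (fun inner e =>
            if e ≠ start then PySem.Dict.insert inner e (PySem.Dict.getD (pvBfs g start) e (-1))
            else inner)
          (PySem.Dict.mk []))) (PySem.Dict.mk []) := by
    apply PySem.List.foldl_congr_mem
    intro acc start _
    congr 1
    apply PySem.List.foldl_congr_mem
    intro acc2 e _
    by_cases hse : start = e
    · subst hse
      simp
    · rw [if_pos hse, if_pos (fun h : e = start => hse h.symm), pvPair_eq g start e]
  rw [hfold]

-- ===== VERDICT (by name: the statement is the Claim_ definition above) =====
theorem reduce_graph_spec : Claim_equal_reduce_graph := by
  intro g r _ _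
  unfold Spec_reduce_graph
  exact pvMain g r
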